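-- pv_equiv track=rewrite | github.com/Danail57/Python_University_Courses | Python_Tasks/Multiplication.py | solution
-- ===== SOURCE A (Python) =====
-- def solution(number):
--     number = abs(number)
--     sum_greater_than_5 = 0
--     sum_less_than_5 = 0
--
--     for digit in str(number):
--         digit = int(digit)
--         if digit < 5:
--             sum_less_than_5 += digit
--         elif digit > 5:
--             sum_greater_than_5 += digit
--     return sum_greater_than_5 * sum_less_than_5
-- ===== SOURCE B (Python) =====
-- def solution(number):
--     # Arithmetic digit extraction: no string conversion, recursive divmod by 10.
--     def sums(n):
--         lo, hi = (0, 0) if n < 10 else sums(n // 10)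
--         d = n % 10
--         if d < 5:
--             lo += d
--         elif d > 5:
--             hi += d
--         return lo, hi
--     lo, hi = sums(abs(number))
--     return hi * lo
-- ===== Notes on version B (the rewrite author's own statement) =====
-- stated objective: alternative
-- what changed: B extracts digits arithmetically (recursive divmod by 10) instead of converting the number to a string and parsing each character back to an int.
import Mathlib
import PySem

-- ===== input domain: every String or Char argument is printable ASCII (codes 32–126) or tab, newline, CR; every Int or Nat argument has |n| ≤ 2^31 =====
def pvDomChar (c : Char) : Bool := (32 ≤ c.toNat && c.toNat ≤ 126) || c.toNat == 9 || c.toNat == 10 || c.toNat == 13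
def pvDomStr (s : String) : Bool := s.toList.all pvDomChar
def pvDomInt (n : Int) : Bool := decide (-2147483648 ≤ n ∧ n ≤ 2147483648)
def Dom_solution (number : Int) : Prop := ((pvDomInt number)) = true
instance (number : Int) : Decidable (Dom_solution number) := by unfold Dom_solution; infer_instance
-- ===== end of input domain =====

-- B replaces A's string-based digit loop by arithmetic digit extraction (recursive divmod by 10); alternative algorithm, same cost.

-- ===== PORT A =====
-- A: number = abs(number); one pass over str(number), int(each char), two accumulators (sum_greater_than_5, sum_less_than_5).
def solutionStepA (acc : Int × Int) (c : Char) : Int × Int :=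
  -- digit = int(digit); on digits of str(abs n) this never raises, getD 0 is unreachable
  let d : Int := (PySem.Int.ofChars? [c]).getD 0
  if d < 5 then (acc.1, acc.2 + d)
  else if d > 5 then (acc.1 + d, acc.2)
  else acc

def solution (number : Int) : Int :=
  let n : Int := |number|
  let r := (PySem.Int.toChars n).foldl solutionStepA (0, 0)
  r.1 * r.2

-- ===== PORT B =====
-- B: sums(n) recursively processes n // 10, then adds digit n % 10 to the proper accumulator.
def solutionSumsB (n : Nat) : Int × Int :=
  let p := if h : n < 10 then ((0 : Int), (0 : Int)) else solutionSumsB (n / 10)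
  let d : Int := (n % 10 : Nat)
  if d < 5 then (p.1 + d, p.2)
  else if d > 5 then (p.1, p.2 + d)
  else p
decreasing_by exact Nat.div_lt_self (by omega) (by omega)

def solution_alt (number : Int) : Int :=
  let p := solutionSumsB number.natAbs
  p.2 * p.1

-- ===== PRECONDITION & SPEC =====
def Spec_solution (number : Int) (out : Int) : Prop := out = solution_alt number
instance (number : Int) (out : Int) : Decidable (Spec_solution number out) := by unfold Spec_solution; infer_instance

-- ===== CLAIM (what is proved, stated in full; the proofs are below) =====
def Claim_equal_solution : Prop := ∀ (number : Int), Dom_solution number → Spec_solution number (solution number)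

-- ===== LEMMAS AND PROOFS =====

-- int() of a single decimal digit character parses back to that digit
lemma parse_digitChar (d : Nat) (hd : d < 10) :
    (PySem.Int.ofChars? [Nat.digitChar d]).getD 0 = (d : Int) := by
  interval_cases d <;> decide

-- A's fold over the decimal digit string of n computes (hi, lo) where B's sums computes (lo, hi)
lemma fold_eq_sums (n : Nat) :
    (Nat.toDigits 10 n).foldl solutionStepA (0, 0) = (solutionSumsB n).swap := by
  induction n using Nat.strong_induction_on with
  | _ n ih =>
    rw [Nat.toDigits_eq_if (by omega)]
    rw [solutionSumsB]
    by_cases h : n < 10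
    · simp only [if_pos h, dif_pos h, List.foldl_cons, List.foldl_nil]
      have hn : n % 10 = n := Nat.mod_eq_of_lt h
      simp only [solutionStepA, hn, parse_digitChar n h]
      split_ifs <;> rfl
    · simp only [if_neg h, dif_neg h, List.foldl_append, List.foldl_cons, List.foldl_nil]
      rw [ih (n / 10) (Nat.div_lt_self (by omega) (by omega))]
      simp only [solutionStepA, parse_digitChar (n % 10) (Nat.mod_lt _ (by omega))]
      split_ifs <;> rfl

-- ===== VERDICT (by name: the statement is the Claim_ definition above) =====
theorem solution_spec : Claim_equal_solution := by
  intro number _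
  show solution number = solution_alt number
  unfold solution solution_alt
  have habs : |number| = (number.natAbs : Int) := Int.abs_eq_natAbs number
  have h0 : ¬ ((number.natAbs : Int) < 0) := by omega
  simp only [habs, PySem.Int.toChars, if_neg h0, Int.toNat_natCast]
  rw [fold_eq_sums]
  rfl
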